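-- pv_equiv track=rewrite | github.com/vhsw/CodeMasters_Tourney | Python 3/countWaysToReachFinish.py | countWaysToReachFinish
-- ===== SOURCE A (Python) =====
-- def countWaysToReachFinish(cells):
--
--     n = len(cells)
--     MAX_MASK = 1 << n
--
--     # dp[m][k] - the number of ways to reach the k-th cell using jumps
--     # that are marked in the mask m.
--     dp = []
--     was = []
--     for m in range(MAX_MASK):
--         dp.append([0] * n)
--         was.append([False] * n)
--     dp[0][0] = 1
--     was[0][0] = True
--
--     def get(m, k):
--         if k < 0 or k >= n or not cells[k]:
--             return 0
--         if was[m][k]: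
--             return dp[m][k]
--         for i in range(1, n):
--             if (m >> i & 1) == 1:
--                 dp[m][k] += get(m ^ (1 << i), k - i)
--                 dp[m][k] += get(m ^ (1 << i), k + i)
--         was[m][k] = True
--         return dp[m][k]
--
--     ans = 0
--     for m in range(0, MAX_MASK):
--         ans += get(m, n - 1)
--
--     return ans
-- ===== SOURCE B (Python) =====
-- def countWaysToReachFinish(cells):
--     # Bottom-up DP over the same dp[mask][pos] table, masks in increasing order.
--     n = len(cells)
--     rows = []
--     for m in range(1 << n):
--         row = []
--         for k in range(n):
--             if not cells[k]:
--                 row.append(0)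
--             elif m == 0:
--                 row.append(1 if k == 0 else 0)
--             else:
--                 s = 0
--                 for i in range(1, n):
--                     if m >> i & 1:
--                         prev = rows[m ^ (1 << i)]
--                         if i <= k:
--                             s += prev[k - i]
--                         if k + i < n:
--                             s += prev[k + i]
--                 row.append(s)
--         rows.append(row)
--     return sum(row[n - 1] for row in rows) if n else 0
-- ===== Notes on version B (the rewrite author's own statement) =====
-- stated objective: alternative
-- what changed: Replaces A's memoized recursive get(m,k) with an explicit bottom-up dynamic program that fills the same dp[mask][pos] table in increasing mask order and sums the last column.
import Mathlib
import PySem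

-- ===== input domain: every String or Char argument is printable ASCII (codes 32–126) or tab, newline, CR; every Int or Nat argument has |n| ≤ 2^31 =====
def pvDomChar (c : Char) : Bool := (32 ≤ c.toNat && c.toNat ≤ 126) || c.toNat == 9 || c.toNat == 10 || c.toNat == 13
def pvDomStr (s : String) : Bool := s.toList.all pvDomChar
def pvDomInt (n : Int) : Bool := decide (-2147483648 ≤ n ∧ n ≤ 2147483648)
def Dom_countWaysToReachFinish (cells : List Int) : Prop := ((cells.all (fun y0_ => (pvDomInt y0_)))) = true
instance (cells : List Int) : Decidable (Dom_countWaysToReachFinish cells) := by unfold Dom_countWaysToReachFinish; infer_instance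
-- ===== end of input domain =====

-- B replaces A's memoized recursive `get` over the dp[mask][pos] table by an explicit
-- bottom-up dynamic program over the same table, filling masks in increasing order
-- (alternative decomposition of the same table).

-- ===== PORT A =====
-- Python truthiness of an int
def pvTruthy (x : Int) : Bool := x != 0

-- termination helper for the memoized recursion: clearing a set bit shrinks the mask
theorem pv_xor_lt (m i : Nat) (h : (m >>> i) &&& 1 = 1) : m ^^^ (1 <<< i) < m := by
  have hb : m.testBit i = true := by
    simp [Nat.testBit, Nat.shiftRight_eq_div_pow, Nat.and_one_is_mod] at h ⊢
    omega
  have h2 : (1 <<< i) = 2 ^ i := by simp [Nat.shiftLeft_eq]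
  rw [h2]
  apply Nat.lt_of_testBit i
  · simp [Nat.testBit_xor, hb]
  · simpa using hb
  · intro j hj
    simp [Nat.testBit_xor, Nat.testBit_two_pow_of_ne (Nat.ne_of_lt hj)]

-- A's inner `get(m, k)` with its memo tables (dp, was) threaded as state
-- (the two Python lists-of-lists are modelled as maps keyed by (mask, cell))
mutual
def pvGetA (cells : List Int) (n : Nat) (m : Nat) (k : Int)
    (st : Std.HashMap (Nat × Nat) Int × Std.HashMap (Nat × Nat) Bool) :
    Int × (Std.HashMap (Nat × Nat) Int × Std.HashMap (Nat × Nat) Bool) :=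
  if k < 0 ∨ (n : Int) ≤ k ∨ ¬ pvTruthy (cells.getD k.toNat 0) then (0, st)
  else if st.2.getD (m, k.toNat) false then (st.1.getD (m, k.toNat) 0, st)
  else
    let st1 := pvLoopA cells n m k.toNat (List.range' 1 (n - 1)) st
    (st1.1.getD (m, k.toNat) 0, (st1.1, st1.2.insert (m, k.toNat) true))
termination_by (m, n + 1)
decreasing_by
  exact Prod.Lex.right m (Nat.lt_succ_of_le (by simp [List.length_range']))

-- A's `for i in range(1, n): if m >> i & 1 == 1: dp[m][k] += get(...); dp[m][k] += get(...)`
def pvLoopA (cells : List Int) (n : Nat) (m : Nat) (kk : Nat) (is : List Nat)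
    (st : Std.HashMap (Nat × Nat) Int × Std.HashMap (Nat × Nat) Bool) :
    Std.HashMap (Nat × Nat) Int × Std.HashMap (Nat × Nat) Bool :=
  match is with
  | [] => st
  | i :: rest =>
    if h : (m >>> i) &&& 1 = 1 then
      let r1 := pvGetA cells n (m ^^^ (1 <<< i)) ((kk : Int) - (i : Int)) st
      let st1 := (r1.2.1.insert (m, kk) (r1.2.1.getD (m, kk) 0 + r1.1), r1.2.2)
      let r2 := pvGetA cells n (m ^^^ (1 <<< i)) ((kk : Int) + (i : Int)) st1
      let st2 := (r2.2.1.insert (m, kk) (r2.2.1.getD (m, kk) 0 + r2.1), r2.2.2)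
      pvLoopA cells n m kk rest st2
    else pvLoopA cells n m kk rest st
termination_by (m, is.length)
decreasing_by
  · exact Prod.Lex.left _ _ (pv_xor_lt m i h)
  · exact Prod.Lex.left _ _ (pv_xor_lt m i h)
  · exact Prod.Lex.right m (Nat.lt_succ_self _)
  · exact Prod.Lex.right m (Nat.lt_succ_self _)
end

def countWaysToReachFinish (cells : List Int) : Int :=
  let n := cells.length
  let dp0 : Std.HashMap (Nat × Nat) Int := (∅ : Std.HashMap (Nat × Nat) Int).insert (0, 0) 1
  let was0 : Std.HashMap (Nat × Nat) Bool := (∅ : Std.HashMap (Nat × Nat) Bool).insert (0, 0) true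
  let r := (List.range (1 <<< n)).foldl
    (fun (acc : Int × (Std.HashMap (Nat × Nat) Int × Std.HashMap (Nat × Nat) Bool)) m =>
      let g := pvGetA cells n m ((n : Int) - 1) acc.2
      (acc.1 + g.1, g.2)) (0, (dp0, was0))
  r.1

-- ===== PORT B =====
def countWaysToReachFinish_alt (cells : List Int) : Int :=
  let n := cells.length
  let rows := (List.range (1 <<< n)).foldl (fun (rows : List (List Int)) m =>
    let row := (List.range n).map (fun k =>
      if ¬ pvTruthy (cells.getD k 0) then 0
      else if m = 0 then (if k = 0 then 1 else 0)
      else (List.range' 1 (n - 1)).foldl (fun (s : Int) i =>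
        if (m >>> i) &&& 1 = 1 then
          let prev := rows.getD (m ^^^ (1 <<< i)) []
          let s' := if i ≤ k then s + prev.getD (k - i) 0 else s
          if k + i < n then s' + prev.getD (k + i) 0 else s'
        else s) 0)
    rows ++ [row]) []
  if n ≠ 0 then (rows.map (fun row => row.getD (n - 1) 0)).sum else 0

-- ===== PRECONDITION & SPEC =====
-- Pre_ excludes only the empty list, on which A raises IndexError (dp[0][0] on an empty row).
def Pre_countWaysToReachFinish (cells : List Int) : Prop := cells ≠ []
instance (cells : List Int) : Decidable (Pre_countWaysToReachFinish cells) := by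
  unfold Pre_countWaysToReachFinish; infer_instance

def pvWitness_countWaysToReachFinish : List Int := [1, 1, 1]

def Spec_countWaysToReachFinish (cells : List Int) (out : Int) : Prop := out = countWaysToReachFinish_alt cells
instance (cells : List Int) (out : Int) : Decidable (Spec_countWaysToReachFinish cells out) := by unfold Spec_countWaysToReachFinish; infer_instance

-- ===== CLAIM (what is proved, stated in full; the proofs are below) =====
def Claim_equal_countWaysToReachFinish : Prop := ∀ (cells : List Int), Dom_countWaysToReachFinish cells → Pre_countWaysToReachFinish cells → Spec_countWaysToReachFinish cells (countWaysToReachFinish cells)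

-- ===== LEMMAS AND PROOFS =====

-- Pure value of A's `get(m, k)`: same gate, same base case, same loop, no memo tables.
mutual
def pvF (cells : List Int) (n : Nat) (m : Nat) (k : Int) : Int :=
  if k < 0 ∨ (n : Int) ≤ k ∨ ¬ pvTruthy (cells.getD k.toNat 0) then 0
  else (if m = 0 ∧ k = 0 then 1 else 0) + pvFs cells n m k (List.range' 1 (n - 1))
termination_by (m, n + 1)
decreasing_by
  exact Prod.Lex.right m (Nat.lt_succ_of_le (by simp [List.length_range']))

def pvFs (cells : List Int) (n : Nat) (m : Nat) (k : Int) (is : List Nat) : Int :=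
  match is with
  | [] => 0
  | i :: rest =>
    (if h : (m >>> i) &&& 1 = 1 then
      pvF cells n (m ^^^ (1 <<< i)) (k - (i : Int)) + pvF cells n (m ^^^ (1 <<< i)) (k + (i : Int))
    else 0) + pvFs cells n m k rest
termination_by (m, is.length)
decreasing_by
  · exact Prod.Lex.left _ _ (pv_xor_lt m i h)
  · exact Prod.Lex.left _ _ (pv_xor_lt m i h)
  · exact Prod.Lex.right m (Nat.lt_succ_self _)
end

def pvInit : Nat → Nat → Int := fun a b => if a = 0 ∧ b = 0 then 1 else 0

-- the dp / was entries of a memo state, as total functions of (mask, cell)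
def pvDP (st : Std.HashMap (Nat × Nat) Int × Std.HashMap (Nat × Nat) Bool) (a b : Nat) : Int :=
  st.1.getD (a, b) 0

def pvWas (st : Std.HashMap (Nat × Nat) Int × Std.HashMap (Nat × Nat) Bool) (a b : Nat) : Bool :=
  st.2.getD (a, b) false

theorem getD_insert_pair {α : Type} (h : Std.HashMap (Nat × Nat) α) (m kk a b : Nat) (v d : α) :
    (h.insert (m, kk) v).getD (a, b) d = if a = m ∧ b = kk then v else h.getD (a, b) d := by
  rw [Std.HashMap.getD_insert]
  by_cases hab : a = m ∧ b = kk
  · obtain ⟨rfl, rfl⟩ := hab; simp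
  · rw [if_neg hab, if_neg]
    simp only [beq_iff_eq]
    intro e
    exact hab ⟨(Prod.mk.injEq _ _ _ _ ▸ e).1.symm ▸ rfl, by cases e; rfl⟩

theorem getD_empty_pair {α : Type} (a b : Nat) (d : α) :
    (∅ : Std.HashMap (Nat × Nat) α).getD (a, b) d = d := by
  simp

-- a memo entry is coherent: a marked entry stores the pure value, an unmarked one its initial value
def pvEntryOK (cells : List Int) (n : Nat)
    (st : Std.HashMap (Nat × Nat) Int × Std.HashMap (Nat × Nat) Bool) (a b : Nat) : Prop :=
  (pvWas st a b = true → pvTruthy (cells.getD b 0) = true → pvDP st a b = pvF cells n a (b : Int)) ∧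
  (pvWas st a b = false → pvDP st a b = pvInit a b)

def pvOKb (cells : List Int) (n : Nat)
    (st : Std.HashMap (Nat × Nat) Int × Std.HashMap (Nat × Nat) Bool) (m : Nat) : Prop :=
  ∀ a b, a ≤ m → b < n → pvEntryOK cells n st a b

theorem pvFs_zero (cells : List Int) (n : Nat) (k : Int) (is : List Nat) :
    pvFs cells n 0 k is = 0 := by
  induction is with
  | nil => simp [pvFs]
  | cons i rest ih => simp [pvFs, ih]

theorem pvEntryOK_congr (cells : List Int) (n : Nat)
    (st st' : Std.HashMap (Nat × Nat) Int × Std.HashMap (Nat × Nat) Bool) (a b : Nat)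
    (h1 : pvDP st' a b = pvDP st a b) (h2 : pvWas st' a b = pvWas st a b)
    (h : pvEntryOK cells n st a b) : pvEntryOK cells n st' a b := by
  unfold pvEntryOK at *
  rw [h1, h2]
  exact h

theorem pvLoopA_correct (cells : List Int) (n m kk : Nat)
    (IH : ∀ m', m' < m → ∀ (k : Int)
      (st : Std.HashMap (Nat × Nat) Int × Std.HashMap (Nat × Nat) Bool),
      pvOKb cells n st m' →
      (pvGetA cells n m' k st).1 = pvF cells n m' k ∧
      pvOKb cells n (pvGetA cells n m' k st).2 m' ∧
      (∀ a b, m' < a →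
        pvDP (pvGetA cells n m' k st).2 a b = pvDP st a b ∧
        pvWas (pvGetA cells n m' k st).2 a b = pvWas st a b)) :
    ∀ (is : List Nat) (st : Std.HashMap (Nat × Nat) Int × Std.HashMap (Nat × Nat) Bool),
      (∀ a b, a ≤ m → b < n → ¬(a = m ∧ b = kk) → pvEntryOK cells n st a b) →
      pvWas st m kk = false →
      pvDP (pvLoopA cells n m kk is st) m kk = pvDP st m kk + pvFs cells n m (kk : Int) is ∧
      pvWas (pvLoopA cells n m kk is st) m kk = false ∧
      (∀ a b, a ≤ m → b < n → ¬(a = m ∧ b = kk) →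
        pvEntryOK cells n (pvLoopA cells n m kk is st) a b) ∧
      (∀ a b, m ≤ a → ¬(a = m ∧ b = kk) →
        pvDP (pvLoopA cells n m kk is st) a b = pvDP st a b ∧
        pvWas (pvLoopA cells n m kk is st) a b = pvWas st a b) := by
  intro is
  induction is with
  | nil =>
    intro st H1 H2
    refine ⟨by simp [pvLoopA, pvFs], by simp [pvLoopA, H2], ?_, ?_⟩
    · intro a b ha hb hne; simpa [pvLoopA] using H1 a b ha hb hne
    · intro a b _ _; simp [pvLoopA]
  | cons i rest ih =>
    intro st H1 H2
    by_cases hbit : (m >>> i) &&& 1 = 1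
    · have hm' : m ^^^ (1 <<< i) < m := pv_xor_lt m i hbit
      set m' := m ^^^ (1 <<< i) with hm'def
      -- first recursive call
      have hOK1 : pvOKb cells n st m' := by
        intro a b ha hb
        exact H1 a b (le_of_lt (lt_of_le_of_lt ha hm')) hb
          (by rintro ⟨rfl, rfl⟩; omega)
      obtain ⟨hv1, hok1, hun1⟩ := IH m' hm' ((kk : Int) - (i : Int)) st hOK1
      set r1 := pvGetA cells n m' ((kk : Int) - (i : Int)) st with hr1
      set st1 : Std.HashMap (Nat × Nat) Int × Std.HashMap (Nat × Nat) Bool :=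
        (r1.2.1.insert (m, kk) (r1.2.1.getD (m, kk) 0 + r1.1), r1.2.2) with hst1
      have hst1hot : pvDP st1 m kk = pvDP st m kk + pvF cells n m' ((kk : Int) - (i : Int)) := by
        have e : pvDP st1 m kk = pvDP r1.2 m kk + r1.1 := by
          simp [hst1, pvDP, getD_insert_pair]
        rw [e, (hun1 m kk hm').1, hv1]
      have hst1was : pvWas st1 m kk = false := ((hun1 m kk hm').2).trans H2
      have H1' : ∀ a b, a ≤ m → b < n → ¬(a = m ∧ b = kk) → pvEntryOK cells n st1 a b := by
        intro a b ha hb hne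
        by_cases hup : a ≤ m'
        · refine pvEntryOK_congr cells n r1.2 st1 a b ?_ rfl (hok1 a b hup hb)
          simp [hst1, pvDP, getD_insert_pair, hne]
        · have ham : m' < a := by omega
          refine pvEntryOK_congr cells n st st1 a b ?_ ?_ (H1 a b ha hb hne)
          · have e : pvDP st1 a b = pvDP r1.2 a b := by
              simp [hst1, pvDP, getD_insert_pair, hne]
            exact e.trans (hun1 a b ham).1
          · exact (hun1 a b ham).2
      -- second recursive call
      have hOK2 : pvOKb cells n st1 m' := by
        intro a b ha hb
        exact H1' a b (le_of_lt (lt_of_le_of_lt ha hm')) hb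
          (by rintro ⟨rfl, rfl⟩; omega)
      obtain ⟨hv2, hok2, hun2⟩ := IH m' hm' ((kk : Int) + (i : Int)) st1 hOK2
      set r2 := pvGetA cells n m' ((kk : Int) + (i : Int)) st1 with hr2
      set st2 : Std.HashMap (Nat × Nat) Int × Std.HashMap (Nat × Nat) Bool :=
        (r2.2.1.insert (m, kk) (r2.2.1.getD (m, kk) 0 + r2.1), r2.2.2) with hst2
      have hst2hot : pvDP st2 m kk = pvDP st m kk + pvF cells n m' ((kk : Int) - (i : Int))
          + pvF cells n m' ((kk : Int) + (i : Int)) := by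
        have e : pvDP st2 m kk = pvDP r2.2 m kk + r2.1 := by
          simp [hst2, pvDP, getD_insert_pair]
        rw [e, (hun2 m kk hm').1, hv2, hst1hot]
      have hst2was : pvWas st2 m kk = false := ((hun2 m kk hm').2).trans hst1was
      have H1'' : ∀ a b, a ≤ m → b < n → ¬(a = m ∧ b = kk) → pvEntryOK cells n st2 a b := by
        intro a b ha hb hne
        by_cases hup : a ≤ m'
        · refine pvEntryOK_congr cells n r2.2 st2 a b ?_ rfl (hok2 a b hup hb)
          simp [hst2, pvDP, getD_insert_pair, hne]
        · have ham : m' < a := by omega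
          refine pvEntryOK_congr cells n st1 st2 a b ?_ ?_ (H1' a b ha hb hne)
          · have e : pvDP st2 a b = pvDP r2.2 a b := by
              simp [hst2, pvDP, getD_insert_pair, hne]
            exact e.trans (hun2 a b ham).1
          · exact (hun2 a b ham).2
      obtain ⟨c1, c2, c3, c4⟩ := ih st2 H1'' hst2was
      have hunroll : pvLoopA cells n m kk (i :: rest) st = pvLoopA cells n m kk rest st2 := by
        rw [pvLoopA, dif_pos hbit]
      refine ⟨?_, ?_, ?_, ?_⟩
      · rw [hunroll, c1, hst2hot, pvFs]
        simp [hbit]; ring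
      · rw [hunroll]; exact c2
      · intro a b ha hb hne
        rw [hunroll]; exact c3 a b ha hb hne
      · intro a b ha hne
        rw [hunroll]
        have h2 := c4 a b ha hne
        have ham : m' < a := lt_of_lt_of_le hm' ha
        constructor
        · have e2 : pvDP st2 a b = pvDP r2.2 a b := by
            simp [hst2, pvDP, getD_insert_pair, hne]
          have e1 : pvDP st1 a b = pvDP r1.2 a b := by
            simp [hst1, pvDP, getD_insert_pair, hne]
          exact h2.1.trans (e2.trans ((hun2 a b ham).1.trans
            (e1.trans (hun1 a b ham).1)))
        · exact h2.2.trans ((hun2 a b ham).2.trans (hun1 a b ham).2)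
    · have hunroll : pvLoopA cells n m kk (i :: rest) st = pvLoopA cells n m kk rest st := by
        rw [pvLoopA, dif_neg hbit]
      obtain ⟨c1, c2, c3, c4⟩ := ih st H1 H2
      rw [hunroll]
      refine ⟨?_, c2, c3, c4⟩
      rw [c1, pvFs, dif_neg hbit]; ring

theorem pvGetA_correct (cells : List Int) (n : Nat) :
    ∀ (m : Nat) (k : Int) (st : Std.HashMap (Nat × Nat) Int × Std.HashMap (Nat × Nat) Bool),
      pvOKb cells n st m →
      (pvGetA cells n m k st).1 = pvF cells n m k ∧
      pvOKb cells n (pvGetA cells n m k st).2 m ∧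
      (∀ a b, m < a →
        pvDP (pvGetA cells n m k st).2 a b = pvDP st a b ∧
        pvWas (pvGetA cells n m k st).2 a b = pvWas st a b) := by
  intro m
  induction m using Nat.strong_induction_on with
  | _ m IH =>
  intro k st hOK
  by_cases hg : (k < 0 ∨ (n : Int) ≤ k ∨ ¬ pvTruthy (cells.getD k.toNat 0))
  · rw [pvGetA, if_pos hg, pvF, if_pos hg]
    exact ⟨rfl, hOK, fun a b _ => ⟨rfl, rfl⟩⟩
  · push_neg at hg
    obtain ⟨hg1, hg2, hg3⟩ := hg
    obtain ⟨kk, rfl⟩ : ∃ kk : Nat, (kk : Int) = k := ⟨k.toNat, Int.toNat_of_nonneg hg1⟩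
    have htn : ((kk : Int)).toNat = kk := Int.toNat_natCast kk
    have hkk : kk < n := by exact_mod_cast hg2
    have hgate : ¬ ((kk : Int) < 0 ∨ (n : Int) ≤ (kk : Int) ∨
        ¬ pvTruthy (cells.getD ((kk : Int)).toNat 0)) := by
      push_neg; exact ⟨hg1, hg2, hg3⟩
    have htr : pvTruthy (cells.getD kk 0) = true := by
      rw [htn] at hg3; simpa using hg3
    by_cases hw : pvWas st m kk = true
    · rw [pvGetA, if_neg hgate]
      rw [htn, if_pos (show st.2.getD (m, kk) false = true from hw)]
      refine ⟨(hOK m kk le_rfl hkk).1 hw htr, hOK, fun a b _ => ⟨rfl, rfl⟩⟩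
    · have hw' : pvWas st m kk = false := by simpa using hw
      obtain ⟨c1, c2, c3, c4⟩ :=
        pvLoopA_correct cells n m kk (fun m' hm' => IH m' hm')
          (List.range' 1 (n - 1)) st
          (fun a b ha hb _ => hOK a b ha hb) hw'
      set stL := pvLoopA cells n m kk (List.range' 1 (n - 1)) st with hstL
      have hval : pvDP stL m kk = pvF cells n m (kk : Int) := by
        rw [c1, (hOK m kk le_rfl hkk).2 hw', pvF, if_neg hgate]
        unfold pvInit
        congr 1
        simp
      have hwneg : ¬ (st.2.getD (m, kk) false = true) := by
        simp [show st.2.getD (m, kk) false = false from hw']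
      have hunroll : pvGetA cells n m (kk : Int) st =
          (stL.1.getD (m, kk) 0, (stL.1, stL.2.insert (m, kk) true)) := by
        rw [pvGetA, if_neg hgate, htn, if_neg hwneg]
      rw [hunroll]
      refine ⟨hval, ?_, ?_⟩
      · intro a b ha hb
        by_cases hab : a = m ∧ b = kk
        · obtain ⟨rfl, rfl⟩ := hab
          constructor
          · intro _ _; exact hval
          · intro hC; simp [pvWas, getD_insert_pair] at hC
        · have hent := c3 a b ha hb hab
          refine pvEntryOK_congr cells n stL _ a b rfl ?_ hent
          simp [pvWas, getD_insert_pair, hab]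
      · intro a b hma
        have hne : ¬(a = m ∧ b = kk) := by rintro ⟨rfl, rfl⟩; omega
        have h4 := c4 a b (le_of_lt hma) hne
        refine ⟨h4.1, ?_⟩
        have e : pvWas (stL.1, stL.2.insert (m, kk) true) a b = pvWas stL a b := by
          simp [pvWas, getD_insert_pair, hne]
        exact e.trans h4.2

theorem pvA_fold (cells : List Int) (n : Nat) :
    ∀ (ms : List Nat) (acc : Int × (Std.HashMap (Nat × Nat) Int × Std.HashMap (Nat × Nat) Bool)),
      (∀ a b, b < n → pvEntryOK cells n acc.2 a b) →
      ((ms.foldl (fun (acc : Int × (Std.HashMap (Nat × Nat) Int × Std.HashMap (Nat × Nat) Bool)) m =>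
          let g := pvGetA cells n m ((n : Int) - 1) acc.2
          (acc.1 + g.1, g.2)) acc).1
        = acc.1 + (ms.map (fun m => pvF cells n m ((n : Int) - 1))).sum) ∧
      (∀ a b, b < n → pvEntryOK cells n
        ((ms.foldl (fun (acc : Int × (Std.HashMap (Nat × Nat) Int × Std.HashMap (Nat × Nat) Bool)) m =>
          let g := pvGetA cells n m ((n : Int) - 1) acc.2
          (acc.1 + g.1, g.2)) acc).2) a b) := by
  intro ms
  induction ms with
  | nil => intro acc hOK; exact ⟨by simp, by simpa using hOK⟩
  | cons m ms ih =>
    intro acc hOK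
    obtain ⟨c1, c2, c3⟩ := pvGetA_correct cells n m ((n : Int) - 1) acc.2
      (fun a b _ hb => hOK a b hb)
    set g := pvGetA cells n m ((n : Int) - 1) acc.2 with hg
    have hOK' : ∀ a b, b < n → pvEntryOK cells n g.2 a b := by
      intro a b hb
      by_cases ha : a ≤ m
      · exact c2 a b ha hb
      · exact pvEntryOK_congr cells n acc.2 g.2 a b (c3 a b (by omega)).1
          (c3 a b (by omega)).2 (hOK a b hb)
    obtain ⟨d1, d2⟩ := ih (acc.1 + g.1, g.2) hOK'
    constructor
    · simp only [List.foldl_cons, List.map_cons, List.sum_cons, ← hg]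
      rw [d1]
      simp [c1]; ring
    · intro a b hb
      simpa only [List.foldl_cons, ← hg] using d2 a b hb

theorem pvA_sum (cells : List Int) :
    countWaysToReachFinish cells =
      ((List.range (1 <<< cells.length)).map
        (fun m => pvF cells cells.length m ((cells.length : Int) - 1))).sum := by
  have hinit : ∀ a b, b < cells.length → pvEntryOK cells cells.length
      (((0 : Int), (((∅ : Std.HashMap (Nat × Nat) Int).insert (0, 0) 1),
        ((∅ : Std.HashMap (Nat × Nat) Bool).insert (0, 0) true))) : Int × _).2 a b := by
    intro a b hb
    constructor
    · intro hwas htr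
      have hab : a = 0 ∧ b = 0 := by
        by_contra hab
        simp [pvWas, getD_insert_pair, hab, getD_empty_pair] at hwas
      obtain ⟨rfl, rfl⟩ := hab
      have hdp : pvDP (((∅ : Std.HashMap (Nat × Nat) Int).insert (0, 0) 1),
          ((∅ : Std.HashMap (Nat × Nat) Bool).insert (0, 0) true)) 0 0 = 1 := by
        simp [pvDP, getD_insert_pair]
      rw [hdp, pvF]
      have hgate : ¬ (((0 : Nat) : Int) < 0 ∨ (cells.length : Int) ≤ ((0 : Nat) : Int) ∨
          ¬ pvTruthy (cells.getD ((0 : Nat) : Int).toNat 0)) := by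
        push_neg
        refine ⟨by simp, by exact_mod_cast hb, by simpa using htr⟩
      rw [if_neg hgate]
      simp [pvFs_zero]
    · intro hwas
      by_cases hab : a = 0 ∧ b = 0
      · obtain ⟨rfl, rfl⟩ := hab
        simp [pvWas, getD_insert_pair] at hwas
      · have hdp : pvDP (((∅ : Std.HashMap (Nat × Nat) Int).insert (0, 0) 1),
            ((∅ : Std.HashMap (Nat × Nat) Bool).insert (0, 0) true)) a b = 0 := by
          simp [pvDP, getD_insert_pair, hab, getD_empty_pair]
        rw [hdp]
        simp [pvInit, hab]
  have h := (pvA_fold cells cells.length (List.range (1 <<< cells.length)) _ hinit).1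
  exact h.trans (zero_add _)

theorem pvF_neg (cells : List Int) (n : Nat) (m : Nat) (k : Int) (hk : k < 0) :
    pvF cells n m k = 0 := by
  rw [pvF, if_pos (Or.inl hk)]

theorem pvF_ge (cells : List Int) (n : Nat) (m : Nat) (k : Int) (hk : (n : Int) ≤ k) :
    pvF cells n m k = 0 := by
  rw [pvF, if_pos (Or.inr (Or.inl hk))]

theorem pv_getD_map_range {α : Type} (f : Nat → α) (d : α) (n j : Nat) (hj : j < n) :
    ((List.range n).map f).getD j d = f j := by
  rw [List.getD_eq_getElem?_getD]
  simp [List.getElem?_map, List.getElem?_range, hj]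

def pvRow (cells : List Int) (n m : Nat) : List Int :=
  (List.range n).map (fun k => pvF cells n m (Int.ofNat k))

theorem pvRow_getD (cells : List Int) (n m j : Nat) (hj : j < n) :
    (pvRow cells n m).getD j 0 = pvF cells n m (j : Int) := by
  unfold pvRow
  rw [pv_getD_map_range _ _ _ _ hj, Int.ofNat_eq_natCast]

theorem pvB_inner (cells : List Int) (n M k : Nat) (hk : k < n) :
    ∀ (is : List Nat) (s : Int),
      (is.foldl (fun (s : Int) i =>
        if (M >>> i) &&& 1 = 1 then
          let prev := ((List.range M).map (pvRow cells n)).getD (M ^^^ (1 <<< i)) []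
          let s' := if i ≤ k then s + prev.getD (k - i) 0 else s
          if k + i < n then s' + prev.getD (k + i) 0 else s'
        else s) s)
      = s + pvFs cells n M (k : Int) is := by
  intro is
  induction is with
  | nil => intro s; simp [pvFs]
  | cons i rest ih =>
    intro s
    rw [List.foldl_cons]
    by_cases hbit : (M >>> i) &&& 1 = 1
    · have hm' : M ^^^ (1 <<< i) < M := pv_xor_lt M i hbit
      rw [if_pos hbit]
      simp only [pv_getD_map_range _ _ _ _ hm']
      have e1 : (if i ≤ k then s + (pvRow cells n (M ^^^ (1 <<< i))).getD (k - i) 0 else s)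
          = s + pvF cells n (M ^^^ (1 <<< i)) ((k : Int) - (i : Int)) := by
        by_cases hik : i ≤ k
        · rw [if_pos hik, pvRow_getD _ _ _ _ (by omega : k - i < n)]
          have hcast : ((k - i : Nat) : Int) = (k : Int) - (i : Int) := by omega
          rw [hcast]
        · rw [if_neg hik, pvF_neg _ _ _ _ (by omega)]
          ring
      rw [e1]
      have e2 : (if k + i < n then s + pvF cells n (M ^^^ (1 <<< i)) ((k : Int) - (i : Int))
            + (pvRow cells n (M ^^^ (1 <<< i))).getD (k + i) 0
          else s + pvF cells n (M ^^^ (1 <<< i)) ((k : Int) - (i : Int)))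
          = s + pvF cells n (M ^^^ (1 <<< i)) ((k : Int) - (i : Int))
            + pvF cells n (M ^^^ (1 <<< i)) ((k : Int) + (i : Int)) := by
        by_cases hki : k + i < n
        · rw [if_pos hki, pvRow_getD _ _ _ _ hki]
          have hcast : ((k + i : Nat) : Int) = (k : Int) + (i : Int) := by push_cast; ring
          rw [hcast]
        · rw [if_neg hki,
            pvF_ge cells n (M ^^^ (1 <<< i)) ((k : Int) + (i : Int)) (by push_cast; omega)]
          ring
      rw [e2, ih, pvFs, dif_pos hbit]
      ring
    · rw [if_neg hbit, ih, pvFs, dif_neg hbit]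
      ring

theorem pvB_rows (cells : List Int) (n : Nat) :
    ∀ (M : Nat),
      ((List.range M).foldl (fun (rows : List (List Int)) m =>
        let row := (List.range n).map (fun k =>
          if ¬ pvTruthy (cells.getD k 0) then 0
          else if m = 0 then (if k = 0 then 1 else 0)
          else (List.range' 1 (n - 1)).foldl (fun (s : Int) i =>
            if (m >>> i) &&& 1 = 1 then
              let prev := rows.getD (m ^^^ (1 <<< i)) []
              let s' := if i ≤ k then s + prev.getD (k - i) 0 else s
              if k + i < n then s' + prev.getD (k + i) 0 else s'
            else s) 0)
        rows ++ [row]) [])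
      = (List.range M).map (pvRow cells n) := by
  intro M
  induction M with
  | zero => simp
  | succ M ih =>
    rw [List.range_succ, List.foldl_append, List.map_append, ih, List.foldl_cons,
      List.foldl_nil]
    simp only [List.map_cons, List.map_nil]
    refine congrArg (fun row => _ ++ [row]) ?_
    conv_rhs => rw [pvRow]
    apply List.map_congr_left
    intro k hkmem
    have hk : k < n := List.mem_range.mp hkmem
    rw [Int.ofNat_eq_natCast]
    by_cases hc : pvTruthy (cells.getD k 0)
    · rw [if_neg (by simpa using hc)]
      have hgate : ¬ (((k : Nat) : Int) < 0 ∨ (n : Int) ≤ ((k : Nat) : Int) ∨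
          ¬ pvTruthy (cells.getD ((k : Nat) : Int).toNat 0)) := by
        push_neg
        refine ⟨by simp, by exact_mod_cast hk, by simpa using hc⟩
      by_cases hM : M = 0
      · subst hM
        rw [if_pos rfl, pvF, if_neg hgate]
        rw [pvFs_zero]
        by_cases hk0 : k = 0 <;> simp [hk0]
      · rw [if_neg hM, pvB_inner cells n M k hk, pvF, if_neg hgate]
        have : ¬ (M = 0 ∧ ((k : Nat) : Int) = 0) := by
          rintro ⟨h0, _⟩; exact hM h0
        rw [if_neg this]
    · rw [if_pos (by simpa using hc), pvF,
        if_pos (Or.inr (Or.inr (by simpa using hc)))]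

theorem pvB_sum (cells : List Int) :
    countWaysToReachFinish_alt cells =
      ((List.range (1 <<< cells.length)).map
        (fun m => pvF cells cells.length m ((cells.length : Int) - 1))).sum := by
  simp only [countWaysToReachFinish_alt]
  rw [pvB_rows cells cells.length (1 <<< cells.length)]
  by_cases hn : cells.length = 0
  · rw [if_neg (by simpa using hn), hn]
    simp [pvF_neg cells 0 0 (-1) (by norm_num)]
  · rw [if_pos hn, List.map_map]
    congr 1
    apply List.map_congr_left
    intro m _
    simp only [Function.comp_apply]
    rw [pvRow_getD _ _ _ _ (by omega : cells.length - 1 < cells.length)]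
    have hcast : ((cells.length - 1 : Nat) : Int) = (cells.length : Int) - 1 := by omega
    rw [hcast]

-- ===== VERDICT (by name: the statement is the Claim_ definition above) =====
theorem countWaysToReachFinish_spec : Claim_equal_countWaysToReachFinish := by
  intro cells _ _
  unfold Spec_countWaysToReachFinish
  rw [pvA_sum, pvB_sum]
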